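-- pv_equiv track=rewrite | github.com/HamidrezaDadafarid/Some-little-algorithms | Maximum recangle in a binary matrix/Maximum recangle in a binary matrix.py | find_subrectangle
-- ===== SOURCE A (Python) =====
-- def find_subrectangle(matrix, a, b):
--     if not matrix or not matrix[0]:
--         return None
--     m, n = len(matrix), len(matrix[0])
--     sum_matrix = [[0 for _ in range(n+1)] for _ in range(m+1)]
--     for i in range(1, m+1):
--         for j in range(1, n+1):
--             sum_matrix[i][j] = matrix[i-1][j-1] + sum_matrix[i-1][j] + sum_matrix[i][j-1] - sum_matrix[i-1][j-1]
--
--     for i in range(m - b + 1):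
--         for j in range(n - a + 1):
--             total = sum_matrix[i+b][j+a] - sum_matrix[i+b][j] - sum_matrix[i][j+a] + sum_matrix[i][j]
--             if total == a * b:
--                 return (i, j)
--     return None
-- ===== SOURCE B (Python) =====
-- def find_subrectangle(matrix, a, b):
--     if not matrix or not matrix[0]:
--         return None
--     m, n = len(matrix), len(matrix[0])
--     for i in range(m - b + 1):
--         for j in range(n - a + 1):
--             if sum(matrix[i + di][j + dj] for di in range(b) for dj in range(a)) == a * b:
--                 return (i, j)
--     return None
-- ===== Notes on version B (the rewrite author's own statement) =====
-- stated objective: simpler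
-- what changed: Drops the (m+1)x(n+1) prefix-sum table entirely and instead sums each b-by-a block directly at every candidate top-left corner, comparing the block sum to a*b exactly as A does.
-- outside the precondition, e.g. on find_subrectangle([[1]], -1, 1): A returns (0, 1), B returns None; on find_subrectangle([[1, 1], [1]], 1, 2): A raises IndexError, B returns (0, 0)
import Mathlib
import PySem

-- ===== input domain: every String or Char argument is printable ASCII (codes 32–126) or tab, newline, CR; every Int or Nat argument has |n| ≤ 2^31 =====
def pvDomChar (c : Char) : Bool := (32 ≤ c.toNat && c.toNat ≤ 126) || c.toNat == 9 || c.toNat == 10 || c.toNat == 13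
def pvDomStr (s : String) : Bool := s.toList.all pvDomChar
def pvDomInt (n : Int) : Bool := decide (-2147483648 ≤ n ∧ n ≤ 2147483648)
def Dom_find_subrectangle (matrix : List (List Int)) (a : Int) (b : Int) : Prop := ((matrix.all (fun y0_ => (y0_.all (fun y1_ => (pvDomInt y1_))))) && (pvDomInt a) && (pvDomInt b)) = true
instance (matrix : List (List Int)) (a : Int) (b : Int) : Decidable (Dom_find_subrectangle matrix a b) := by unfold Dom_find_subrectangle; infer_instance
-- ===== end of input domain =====

-- B replaces A's prefix-sum table by a direct sum of each b×a block at every candidate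
-- top-left corner (objective: simpler — no auxiliary table); same scan order, same guard.

-- ===== PORT A =====
-- A-side helpers: the named defs below are the loops of A's Python, step for step.

-- body of A's inner table loop: sum_matrix[i][j] = matrix[i-1][j-1] + sm[i-1][j] + sm[i][j-1] - sm[i-1][j-1]
def pvAStep (matrix : List (List Int)) (i : Int) (sm : List (List Int)) (j : Int) : List (List Int) :=
  let v : Int :=
    PySem.List.pyGetD (PySem.List.pyGetD matrix (i-1) []) (j-1) 0
    + PySem.List.pyGetD (PySem.List.pyGetD sm (i-1) []) j 0
    + PySem.List.pyGetD (PySem.List.pyGetD sm i []) (j-1) 0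
    - PySem.List.pyGetD (PySem.List.pyGetD sm (i-1) []) (j-1) 0
  PySem.List.pySetD sm i (PySem.List.pySetD (PySem.List.pyGetD sm i []) j v)

-- A's inner loop 'for j in range(1, n+1)'
def pvARow (matrix : List (List Int)) (n : Int) (sm : List (List Int)) (i : Int) : List (List Int) :=
  (PySem.List.pyRange 1 (n+1) 1).foldl (pvAStep matrix i) sm

-- A's table construction: the comprehension-built zero table, then 'for i in range(1, m+1)'
def pvATable (matrix : List (List Int)) (m n : Int) : List (List Int) :=
  (PySem.List.pyRange 1 (m+1) 1).foldl (pvARow matrix n)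
    ((PySem.List.pyRange 0 (m+1) 1).map (fun _ => (PySem.List.pyRange 0 (n+1) 1).map (fun _ => (0:Int))))

-- A's 'total' expression
def pvATotal (sm : List (List Int)) (a b i j : Int) : Int :=
  PySem.List.pyGetD (PySem.List.pyGetD sm (i+b) []) (j+a) 0
  - PySem.List.pyGetD (PySem.List.pyGetD sm (i+b) []) j 0
  - PySem.List.pyGetD (PySem.List.pyGetD sm i []) (j+a) 0
  + PySem.List.pyGetD (PySem.List.pyGetD sm i []) j 0

def find_subrectangle (matrix : List (List Int)) (a : Int) (b : Int) : Option (Int × Int) :=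
  if matrix = [] ∨ matrix.headD [] = [] then none
  else
    let m : Int := matrix.length
    let n : Int := (matrix.headD []).length
    let sm := pvATable matrix m n
    (PySem.List.pyRange 0 (m - b + 1) 1).findSome? (fun i =>
      (PySem.List.pyRange 0 (n - a + 1) 1).findSome? (fun j =>
        if pvATotal sm a b i j = a * b then some (i, j) else none))

-- ===== PORT B =====
-- B-side helper: the generator-sum 'sum(matrix[i+di][j+dj] for di in range(b) for dj in range(a))'
def pvBlock (matrix : List (List Int)) (a b i j : Int) : Int :=
  (PySem.List.pyRange 0 b 1).foldl (fun acc di =>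
    (PySem.List.pyRange 0 a 1).foldl (fun acc dj =>
      acc + PySem.List.pyGetD (PySem.List.pyGetD matrix (i+di) []) (j+dj) 0) acc) 0

def find_subrectangle_alt (matrix : List (List Int)) (a : Int) (b : Int) : Option (Int × Int) :=
  if matrix = [] ∨ matrix.headD [] = [] then none
  else
    let m : Int := matrix.length
    let n : Int := (matrix.headD []).length
    (PySem.List.pyRange 0 (m - b + 1) 1).findSome? (fun i =>
      (PySem.List.pyRange 0 (n - a + 1) 1).findSome? (fun j =>
        if pvBlock matrix a b i j = a * b then some (i, j) else none))

-- ===== PRECONDITION & SPEC =====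
-- Pre_ excludes, for matrices with a non-empty first row, (1) negative a or b, where A's
-- negative-index wraparound into the prefix table is accidental (A usually raises IndexError
-- there, and where it returns the position is meaningless), and (2) matrices having a row
-- shorter than row 0, on which A raises IndexError while building the table.
def Pre_find_subrectangle (matrix : List (List Int)) (a : Int) (b : Int) : Prop :=
  matrix.headD [] = [] ∨
    (0 ≤ a ∧ 0 ≤ b ∧ ∀ row ∈ matrix, (matrix.headD []).length ≤ row.length)
instance (matrix : List (List Int)) (a : Int) (b : Int) : Decidable (Pre_find_subrectangle matrix a b) := by unfold Pre_find_subrectangle; infer_instance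

def pvWitness_find_subrectangle : List (List Int) × Int × Int := ([[1, 0], [1, 1]], 1, 2)

def Spec_find_subrectangle (matrix : List (List Int)) (a : Int) (b : Int) (out : Option (Int × Int)) : Prop := out = find_subrectangle_alt matrix a b
instance (matrix : List (List Int)) (a : Int) (b : Int) (out : Option (Int × Int)) : Decidable (Spec_find_subrectangle matrix a b out) := by unfold Spec_find_subrectangle; infer_instance

-- ===== CLAIM (what is proved, stated in full; the proofs are below) =====
def Claim_equal_find_subrectangle : Prop := ∀ (matrix : List (List Int)) (a : Int) (b : Int), Dom_find_subrectangle matrix a b → Pre_find_subrectangle matrix a b → Spec_find_subrectangle matrix a b (find_subrectangle matrix a b)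

-- ===== LEMMAS AND PROOFS =====

-- matrix cell as a plain Nat-indexed lookup (default 0, like the ports' pyGetD)
def pvGet (M : List (List Int)) (p q : Nat) : Int := (M.getD p []).getD q 0

-- the exact prefix sum A's table holds at (i, j)
def pvP (M : List (List Int)) (i j : Nat) : Int :=
  ∑ p ∈ Finset.range i, ∑ q ∈ Finset.range j, pvGet M p q

def pvEntry (T : List (List Int)) (i j : Nat) : Int := (T.getD i []).getD j 0

-- invariant after A's outer table loop has processed rows 1..k
def pvInv (M : List (List Int)) (m n k : Nat) (T : List (List Int)) : Prop :=
  T.length = m + 1 ∧ (∀ i ≤ m, (T.getD i []).length = n + 1) ∧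
  (∀ i ≤ m, ∀ j ≤ n, pvEntry T i j = if i ≤ k then pvP M i j else 0)

lemma pvP_rec (M : List (List Int)) (k l : Nat) :
    pvP M (k+1) (l+1) = pvGet M k l + pvP M k (l+1) + pvP M (k+1) l - pvP M k l := by
  simp [pvP, Finset.sum_range_succ]; ring

lemma getD_set' {α : Type} (xs : List α) (j j' : Nat) (v d : α) (h : j < xs.length) :
    (xs.set j v).getD j' d = if j' = j then v else xs.getD j' d := by
  have h2 := PySem.List.pyGetD_pySetD_natCast xs j j' v d h
  rw [PySem.List.pySetD_natCast] at h2
  simpa [PySem.List.pyGetD_natCast] using h2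

lemma pvRow_aux (M : List (List Int)) (m n k : Nat) (hk : k < m)
    (T : List (List Int)) (hInv : pvInv M m n k T) :
    ∀ l, l ≤ n →
      (fun T' => T'.length = m + 1 ∧ (∀ i ≤ m, (T'.getD i []).length = n + 1) ∧
        (∀ i, i ≤ m → i ≠ k+1 → ∀ j ≤ n, pvEntry T' i j = if i ≤ k then pvP M i j else 0) ∧
        (∀ j ≤ n, pvEntry T' (k+1) j = if j ≤ l then pvP M (k+1) j else 0))
      ((PySem.List.pyRange 1 ((l:Int)+1) 1).foldl (pvAStep M ((k:Int)+1)) T) := by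
  obtain ⟨hlen, hrows, hent⟩ := hInv
  intro l
  induction l with
  | zero =>
    intro _
    rw [PySem.List.pyRange_one_eq_nil (by norm_num)]
    simp only [List.foldl_nil]
    refine ⟨hlen, hrows, fun i hi _ j hj => hent i hi j hj, fun j hj => ?_⟩
    rw [hent (k+1) (by omega) j hj, if_neg (by omega)]
    rcases Nat.eq_zero_or_pos j with h | h
    · subst h; simp [pvP]
    · rw [if_neg (by omega)]
  | succ l ih =>
    intro hl1
    have ih' := ih (by omega)
    set T' := (PySem.List.pyRange 1 ((l:Int)+1) 1).foldl (pvAStep M ((k:Int)+1)) T with hT'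
    obtain ⟨len', rows', ent', row'⟩ := ih'
    have hsplit : ((l+1 : Nat) : Int) + 1 = ((l:Int)+1) + 1 := by push_cast; ring
    rw [hsplit, PySem.List.pyRange_one_succ_right (by omega), List.foldl_append]
    simp only [List.foldl_cons, List.foldl_nil]
    -- the single step at j = l+1
    have hcast1 : ((k:Int)+1) - 1 = (k:Int) := by ring
    have hcast2 : ((l:Int)+1) - 1 = (l:Int) := by ring
    have hcast3 : ((k:Int)+1) = ((k+1 : Nat) : Int) := by push_cast; ring
    have hcast4 : ((l:Int)+1) = ((l+1 : Nat) : Int) := by push_cast; ring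
    have hrowlen : (T'.getD (k+1) []).length = n + 1 := rows' (k+1) (by omega)
    have hstep : pvAStep M ((k:Int)+1) T' ((l:Int)+1) =
        T'.set (k+1) ((T'.getD (k+1) []).set (l+1) (pvP M (k+1) (l+1))) := by
      unfold pvAStep
      rw [hcast1, hcast2, hcast3, hcast4]
      simp only [PySem.List.pyGetD_natCast, PySem.List.pySetD_natCast]
      have e1 : pvEntry T' k (l+1) = pvP M k (l+1) := by
        rw [ent' k (by omega) (by omega) (l+1) hl1]; simp
      have e2 : pvEntry T' (k+1) l = pvP M (k+1) l := by
        rw [row' l (by omega)]; simp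
      have e3 : pvEntry T' k l = pvP M k l := by
        rw [ent' k (by omega) (by omega) l (by omega)]; simp
      simp only [pvEntry] at e1 e2 e3
      rw [e1, e2, e3, pvP_rec]
      simp only [pvGet]
    rw [hstep]
    have hklen : k + 1 < T'.length := by omega
    refine ⟨by simp [len'], ?_, ?_, ?_⟩
    · intro i hi
      rw [getD_set' T' (k+1) i _ [] hklen]
      split
      · next h => subst h; rw [List.length_set]; exact hrowlen
      · exact rows' i hi
    · intro i hi hne j hj
      simp only [pvEntry]
      rw [getD_set' T' (k+1) i _ [] hklen, if_neg hne]
      exact ent' i hi hne j hj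
    · intro j hj
      simp only [pvEntry]
      rw [getD_set' T' (k+1) (k+1) _ [] hklen, if_pos rfl,
          getD_set' _ (l+1) j _ 0 (by omega)]
      split
      · next h => subst h; simp
      · next h =>
        have hr := row' j hj
        simp only [pvEntry] at hr
        rw [hr]
        by_cases hjl : j ≤ l
        · rw [if_pos hjl, if_pos (by omega)]
        · rw [if_neg hjl, if_neg (by omega)]

lemma pvRow_inv (M : List (List Int)) (m n k : Nat) (hk : k < m)
    (T : List (List Int)) (hInv : pvInv M m n k T) :
    pvInv M m n (k+1) (pvARow M (n : Int) T ((k : Int) + 1)) := by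
  have h := pvRow_aux M m n k hk T hInv n le_rfl
  obtain ⟨len', rows', ent', row'⟩ := h
  unfold pvARow
  refine ⟨len', rows', ?_⟩
  intro i hi j hj
  by_cases hik : i = k + 1
  · subst hik
    rw [row' j hj, if_pos hj, if_pos le_rfl]
  · rw [ent' i hi hik j hj]
    by_cases hle : i ≤ k
    · rw [if_pos hle, if_pos (by omega)]
    · rw [if_neg hle, if_neg (by omega)]

lemma pvTable_inv (M : List (List Int)) (m n : Nat) :
    ∀ k ≤ m, pvInv M m n k
      ((PySem.List.pyRange 1 ((k : Int)+1) 1).foldl (pvARow M (n : Int))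
        ((PySem.List.pyRange 0 ((m : Int)+1) 1).map (fun _ => (PySem.List.pyRange 0 ((n : Int)+1) 1).map (fun _ => (0:Int))))) := by
  intro k
  induction k with
  | zero =>
    intro _
    have hz : PySem.List.pyRange (1:Int) (((0:Nat):Int)+1) 1 = [] :=
      PySem.List.pyRange_one_eq_nil (by norm_num)
    rw [hz]
    simp only [List.foldl_nil, List.map_const', PySem.List.length_pyRange_one]
    have hm1 : ((m:Int)+1-0).toNat = m + 1 := by omega
    have hn1 : ((n:Int)+1-0).toNat = n + 1 := by omega
    rw [hm1, hn1]
    refine ⟨by simp, ?_, ?_⟩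
    · intro i hi
      rw [List.getD_replicate _ (by omega), List.length_replicate]
    · intro i hi j hj
      simp only [pvEntry]
      rw [List.getD_replicate _ (by omega), List.getD_replicate _ (by omega)]
      rcases Nat.eq_zero_or_pos i with h | h
      · subst h; simp [pvP]
      · rw [if_neg (by omega)]
  | succ k ih =>
    intro hk1
    have hsplit : ((k+1 : Nat) : Int) + 1 = ((k:Int)+1) + 1 := by push_cast; ring
    have hr : PySem.List.pyRange (1:Int) (((k:Int)+1)+1) 1
        = PySem.List.pyRange (1:Int) ((k:Int)+1) 1 ++ [(k:Int)+1] :=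
      PySem.List.pyRange_one_succ_right (by omega)
    rw [hsplit, hr, List.foldl_append]
    simp only [List.foldl_cons, List.foldl_nil]
    exact pvRow_inv M m n k (by omega) _ (ih (by omega))

lemma pvRect (M : List (List Int)) (i j bb aa : Nat) :
    pvP M (i+bb) (j+aa) - pvP M (i+bb) j - pvP M i (j+aa) + pvP M i j
      = ∑ di ∈ Finset.range bb, ∑ dj ∈ Finset.range aa, pvGet M (i+di) (j+dj) := by
  simp [pvP, Finset.sum_range_add, Finset.sum_add_distrib]; ring

lemma sum_map_range (f : Nat → Int) (n : Nat) : ((List.range n).map f).sum = ∑ k ∈ Finset.range n, f k := by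
  induction n with
  | zero => simp
  | succ n ih => simp [List.range_succ, Finset.sum_range_succ, ih]

lemma pvBlock_eq (M : List (List Int)) (aa bb i j : Nat) :
    pvBlock M ↑aa ↑bb ↑i ↑j = ∑ di ∈ Finset.range bb, ∑ dj ∈ Finset.range aa, pvGet M (i+di) (j+dj) := by
  unfold pvBlock
  rw [PySem.List.pyRange_zero_nat bb, PySem.List.pyRange_zero_nat aa]
  simp only [List.foldl_map, ← Nat.cast_add, PySem.List.pyGetD_natCast]
  simp only [PySem.List.foldl_add, sum_map_range]
  simp [pvGet]

lemma pvFindSome?_congr {α β : Type} (l : List α) (f g : α → Option β)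
    (h : ∀ x ∈ l, f x = g x) : l.findSome? f = l.findSome? g := by
  induction l with
  | nil => rfl
  | cons x xs ih =>
    simp only [List.findSome?_cons, h x (by simp)]
    cases g x with
    | none => exact ih (fun y hy => h y (by simp [hy]))
    | some v => rfl

lemma pvTotal_eq_block (matrix : List (List Int)) (a b i j : Int)
    (ha : 0 ≤ a) (hb : 0 ≤ b) (hi0 : 0 ≤ i) (hj0 : 0 ≤ j)
    (hi1 : i < (matrix.length : Int) - b + 1)
    (hj1 : j < ((matrix.headD []).length : Int) - a + 1) :
    pvATotal (pvATable matrix (matrix.length : Int) ((matrix.headD []).length : Int)) a b i j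
      = pvBlock matrix a b i j := by
  have hia : i = ((i.toNat : Nat) : Int) := (Int.toNat_of_nonneg hi0).symm
  have hja : j = ((j.toNat : Nat) : Int) := (Int.toNat_of_nonneg hj0).symm
  have haa : a = ((a.toNat : Nat) : Int) := (Int.toNat_of_nonneg ha).symm
  have hba : b = ((b.toNat : Nat) : Int) := (Int.toNat_of_nonneg hb).symm
  set m := matrix.length with hm
  set n := (matrix.headD []).length with hn
  set i' := i.toNat; set j' := j.toNat; set a' := a.toNat; set b' := b.toNat
  have hib : i' + b' ≤ m := by omega
  have hja' : j' + a' ≤ n := by omega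
  have hi' : i' ≤ m := by omega
  have hj' : j' ≤ n := by omega
  obtain ⟨-, -, hent⟩ := pvTable_inv matrix m n m le_rfl
  simp only [pvEntry] at hent
  rw [hia, hja, haa, hba]
  unfold pvATotal pvATable
  simp only [← Nat.cast_add, PySem.List.pyGetD_natCast]
  rw [hent (i'+b') hib (j'+a') hja', hent (i'+b') hib j' hj',
      hent i' hi' (j'+a') hja', hent i' hi' j' hj',
      if_pos hib, if_pos hi', if_pos hi', if_pos hib]
  rw [pvRect, pvBlock_eq]

-- ===== VERDICT (by name: the statement is the Claim_ definition above) =====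
theorem find_subrectangle_spec : Claim_equal_find_subrectangle := by
  intro matrix a b _ hpre
  unfold Spec_find_subrectangle find_subrectangle find_subrectangle_alt
  by_cases hg : matrix = [] ∨ matrix.headD [] = []
  · rw [if_pos hg, if_pos hg]
  · rw [if_neg hg, if_neg hg]
    obtain hh | ⟨ha, hb, -⟩ := hpre
    · exact absurd (Or.inr hh) hg
    apply pvFindSome?_congr
    intro i hi
    apply pvFindSome?_congr
    intro j hj
    rw [PySem.List.mem_pyRange_one] at hi hj
    rw [pvTotal_eq_block matrix a b i j ha hb hi.1 hj.1 hi.2 hj.2]
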